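-- pv_equiv track=rewrite | github.com/Colin-the/multiset | parentTree.py | num_representatives
-- ===== SOURCE A (Python) =====
-- from math import gcd, comb
--
-- def num_representatives(m: int, k: int) -> int:
--     if k <= 0:
--         if m == 0:
--             return 1
--         return 0
--     total = 0
--     for r in range(k):
--         t = gcd(k, r)
--         L = k // t
--         if m % L != 0:
--             fix = 0
--         else:
--             S = m // L
--             fix = comb(S + t - 1, t - 1)  # weak compositions of S into t parts
--         total += fix
--     return total // k
-- ===== SOURCE B (Python) =====
-- from math import gcd, comb
--
-- def num_representatives(m: int, k: int) -> int:
--     # Burnside sum grouped by the value t = gcd(k, r): each divisor t of k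
--     # occurs for exactly phi(k // t) residues r, so one comb() per divisor.
--     if k <= 0:
--         return 1 if m == 0 else 0
--     total = 0
--     for t in range(1, k + 1):
--         if k % t != 0:
--             continue
--         L = k // t
--         if m % L != 0:
--             continue
--         phi = sum(1 for x in range(L) if gcd(L, x) == 1)
--         total += phi * comb(m // L + t - 1, t - 1)
--     return total // k
-- ===== Notes on version B (the rewrite author's own statement) =====
-- stated objective: alternative
-- what changed: B replaces A's sum of one binomial term per residue r in range(k) with the Burnside divisor grouping: it iterates only over divisors t of k, weighting the single binomial term for t by the count of residues coprime to k//t (Euler phi), so comb() is evaluated once per divisor instead of once per residue.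
import Mathlib
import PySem

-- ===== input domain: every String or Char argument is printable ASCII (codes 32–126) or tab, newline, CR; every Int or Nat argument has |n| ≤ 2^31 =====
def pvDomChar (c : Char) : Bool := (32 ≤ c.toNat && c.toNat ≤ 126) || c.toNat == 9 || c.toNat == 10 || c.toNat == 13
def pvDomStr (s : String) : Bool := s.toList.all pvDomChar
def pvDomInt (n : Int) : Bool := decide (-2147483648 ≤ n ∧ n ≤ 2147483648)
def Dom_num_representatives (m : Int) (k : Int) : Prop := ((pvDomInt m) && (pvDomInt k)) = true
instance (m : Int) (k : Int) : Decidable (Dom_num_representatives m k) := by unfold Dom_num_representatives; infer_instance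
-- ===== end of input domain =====

-- B groups A's Burnside sum by the divisor t = gcd(k, r), weighting each divisor's
-- binomial term by the coprime-residue count (Euler phi); equivalence of return values.

-- ===== PORT A =====
-- math.gcd on nonnegative ints (exact there; all calls here have nonneg arguments)
def pygcd (a b : Int) : Int := (Int.gcd a b : Int)
-- math.comb n r (exact for 0 ≤ n, 0 ≤ r, which Pre_ guarantees at every call site)
def pycomb (n r : Int) : Int := (Nat.choose n.toNat r.toNat : Int)

def num_representatives (m : Int) (k : Int) : Int :=
  if k ≤ 0 then (if m = 0 then 1 else 0)
  else
    let total := (PySem.List.pyRange 0 k 1).foldl (fun total r =>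
      let t := pygcd k r
      let L := PySem.Int.floordiv k t
      let fix := if PySem.Int.mod m L ≠ 0 then (0 : Int)
                 else pycomb (PySem.Int.floordiv m L + t - 1) (t - 1)
      total + fix) 0
    PySem.Int.floordiv total k

-- ===== PORT B =====
-- port of Source B's 'sum(1 for x in range(L) if gcd(L, x) == 1)'
def phiCount (L : Int) : Int :=
  (PySem.List.pyRange 0 L 1).foldl (fun acc x => if pygcd L x = 1 then acc + 1 else acc) 0

def num_representatives_alt (m : Int) (k : Int) : Int :=
  if k ≤ 0 then (if m = 0 then 1 else 0)
  else
    let total := (PySem.List.pyRange 1 (k + 1) 1).foldl (fun total t =>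
      if PySem.Int.mod k t ≠ 0 then total
      else
        let L := PySem.Int.floordiv k t
        if PySem.Int.mod m L ≠ 0 then total
        else total + phiCount L * pycomb (PySem.Int.floordiv m L + t - 1) (t - 1)) 0
    PySem.Int.floordiv total k

-- ===== PRECONDITION & SPEC =====
-- Pre_ excludes exactly the inputs where Python A raises: for k > 0 and m ≤ -k,
-- math.comb receives a negative first argument and raises ValueError.
def Pre_num_representatives (m : Int) (k : Int) : Prop := k ≤ 0 ∨ -k < m
instance (m : Int) (k : Int) : Decidable (Pre_num_representatives m k) := by
  unfold Pre_num_representatives; infer_instance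
def pvWitness_num_representatives : Int × Int := (6, 4)

def Spec_num_representatives (m : Int) (k : Int) (out : Int) : Prop := out = num_representatives_alt m k
instance (m : Int) (k : Int) (out : Int) : Decidable (Spec_num_representatives m k out) := by unfold Spec_num_representatives; infer_instance

-- ===== CLAIM (what is proved, stated in full; the proofs are below) =====
def Claim_equal_num_representatives : Prop := ∀ (m : Int) (k : Int), Dom_num_representatives m k → Pre_num_representatives m k → Spec_num_representatives m k (num_representatives m k)

-- ===== LEMMAS AND PROOFS =====

-- list-sum over List.range is the Finset.range sum
theorem list_map_range_sum (n : Nat) (F : Nat → Int) :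
    ((List.range n).map F).sum = ∑ i ∈ Finset.range n, F i := by
  induction n with
  | zero => simp
  | succ n ih => rw [List.range_succ, Finset.sum_range_succ]; simp [ih]

-- pygcd on casts of naturals
theorem pygcd_natCast (a b : Nat) : pygcd (a : Int) (b : Int) = (Nat.gcd a b : Int) := by
  simp [pygcd, Int.gcd]

-- the per-divisor term shared by both programs
def fixTerm (m k : Int) (t : Nat) : Int :=
  let L := PySem.Int.floordiv k (t : Int)
  if PySem.Int.mod m L ≠ 0 then 0
  else pycomb (PySem.Int.floordiv m L + (t : Int) - 1) ((t : Int) - 1)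

-- phiCount computes Euler's totient on nonnegative inputs
theorem phiCount_eq_totient (n : Nat) : phiCount (n : Int) = (Nat.totient n : Int) := by
  unfold phiCount
  rw [PySem.List.pyRange_zero_natCast, List.foldl_map]
  have h1 : (List.range n).foldl
      (fun (acc : Int) (x : Nat) => if pygcd (n : Int) (x : Int) = 1 then acc + 1 else acc) 0
      = (List.range n).foldl
      (fun (acc : Int) (x : Nat) => acc + (if Nat.gcd n x = 1 then (1 : Int) else 0)) 0 := by
    refine PySem.List.foldl_congr_mem _ _ _ _ ?_
    intro acc x _
    rw [pygcd_natCast]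
    by_cases h : Nat.gcd n x = 1 <;> simp [h]
  rw [h1, PySem.List.foldl_add, list_map_range_sum, zero_add, Nat.totient, Finset.card_filter]
  push_cast
  exact Finset.sum_congr rfl fun x _ => by simp [Nat.Coprime]

-- Burnside grouping: summing F over gcd(K, r) fiberwise by divisors
theorem gcd_fiber_sum (K : Nat) (hK : 0 < K) (F : Nat → Int) :
    ∑ r ∈ Finset.range K, F (Nat.gcd K r) =
    ∑ t ∈ K.divisors, (Nat.totient (K / t) : Int) * F t := by
  rw [← Finset.sum_fiberwise_of_maps_to (g := fun r => Nat.gcd K r)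
      (fun x _ => Nat.mem_divisors.2 ⟨Nat.gcd_dvd_left _ _, hK.ne'⟩)]
  refine Finset.sum_congr rfl fun t ht => ?_
  have h2 : ∀ r ∈ {r ∈ Finset.range K | Nat.gcd K r = t}, F (Nat.gcd K r) = F t := by
    intro r hr
    rw [(Finset.mem_filter.1 hr).2]
  rw [Finset.sum_congr rfl h2, Finset.sum_const,
      ← Nat.totient_div_of_dvd (Nat.dvd_of_mem_divisors ht)]
  simp

-- A's loop as a divisor-weighted sum
theorem A_total (m k : Int) (K : Nat) (hk : k = (K : Int)) (hK : 0 < K) :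
    (PySem.List.pyRange 0 k 1).foldl (fun total r =>
      let t := pygcd k r
      let L := PySem.Int.floordiv k t
      let fix := if PySem.Int.mod m L ≠ 0 then (0 : Int)
                 else pycomb (PySem.Int.floordiv m L + t - 1) (t - 1)
      total + fix) 0 =
    ∑ t ∈ K.divisors, (Nat.totient (K / t) : Int) * fixTerm m k t := by
  subst hk
  rw [PySem.List.pyRange_zero_natCast, List.foldl_map]
  refine Eq.trans (PySem.List.foldl_congr_mem
    _ _ (fun (total : Int) (x : Nat) => total + fixTerm m (K : Int) (Nat.gcd K x)) _ ?_) ?_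
  · intro acc x _
    simp only [pygcd_natCast, fixTerm]
  · rw [PySem.List.foldl_add, list_map_range_sum, zero_add]
    exact gcd_fiber_sum K hK _

-- B's loop as the same divisor-weighted sum
theorem B_total (m k : Int) (K : Nat) (hk : k = (K : Int)) (hK : 0 < K) :
    (PySem.List.pyRange 1 (k + 1) 1).foldl (fun total t =>
      if PySem.Int.mod k t ≠ 0 then total
      else
        let L := PySem.Int.floordiv k t
        if PySem.Int.mod m L ≠ 0 then total
        else total + phiCount L * pycomb (PySem.Int.floordiv m L + t - 1) (t - 1)) 0 =
    ∑ t ∈ K.divisors, (Nat.totient (K / t) : Int) * fixTerm m k t := by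
  subst hk
  rw [PySem.List.pyRange_one]
  have hT : ((K : Int) + 1 - 1).toNat = K := by omega
  rw [hT, List.foldl_map]
  refine Eq.trans (PySem.List.foldl_congr_mem
    _ _ (fun (total : Int) (j : Nat) => total +
      (if (j + 1) ∣ K then (Nat.totient (K / (j + 1)) : Int) * fixTerm m (K : Int) (j + 1) else 0)) _ ?_) ?_
  · intro acc j _
    have hc : (1 : Int) + (j : Int) = ((j + 1 : Nat) : Int) := by push_cast; ring
    simp only [hc, PySem.Int.mod_natCast, PySem.Int.floordiv_natCast, phiCount_eq_totient]
    by_cases hd : (j + 1) ∣ K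
    · have hmod : K % (j + 1) = 0 := Nat.dvd_iff_mod_eq_zero.mp hd
      simp only [fixTerm, PySem.Int.floordiv_natCast, hmod, hd, if_true, Nat.cast_zero]
      norm_num
      split <;> simp
    · have hd' : ¬((j : Int) + 1 ∣ (K : Int)) := by
        rw [show ((j : Int) + 1) = ((j + 1 : Nat) : Int) by push_cast; ring,
          Int.natCast_dvd_natCast]
        exact hd
      simp [hd, hd']
  · rw [PySem.List.foldl_add, list_map_range_sum, zero_add]
    have h2 : ∑ j ∈ Finset.range K,
          (if (j + 1) ∣ K then (Nat.totient (K / (j + 1)) : Int) * fixTerm m (K : Int) (j + 1) else 0)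
        = ∑ t ∈ Finset.Ico 1 (K + 1),
          (if t ∣ K then (Nat.totient (K / t) : Int) * fixTerm m (K : Int) t else 0) := by
      rw [Finset.sum_Ico_eq_sum_range]
      simp only [Nat.add_sub_cancel]
      exact Finset.sum_congr rfl fun j _ => by rw [Nat.add_comm 1 j]
    rw [h2, ← Finset.sum_filter]
    rfl

-- ===== VERDICT (by name: the statement is the Claim_ definition above) =====
theorem num_representatives_spec : Claim_equal_num_representatives := by
  intro m k _ _
  unfold Spec_num_representatives num_representatives num_representatives_alt
  by_cases hk : k ≤ 0
  · simp [hk]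
  · have hkpos : 0 < k := lt_of_not_ge hk
    obtain ⟨K, hK⟩ : ∃ K : Nat, k = (K : Int) := ⟨k.toNat, by omega⟩
    have hKpos : 0 < K := by omega
    simp only [hk, if_false]
    rw [A_total m k K hK hKpos, B_total m k K hK hKpos]
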